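-- pv_equiv track=rewrite | github.com/anatoole/WVDPytorch | utils.py | rewrite
-- ===== SOURCE A (Python) =====
-- def rewrite(infile):
--     edit  = []
--     for i in range(len(infile)):
--         string = str(infile[i])
--         row = string.replace('[','')
--         row = row.replace(']','')
--         row = row.replace('\"','')
--         row = row.replace('\n','')
--         row = row.replace(' ','')
--         row = row.replace('\'','')
--         row = row.replace('?','')
--         edit.append(row)
--     return(edit)
-- ===== SOURCE B (Python) =====
-- def rewrite(infile):
--     bad = set('[]"\n \'?')
--     return [''.join(ch for ch in str(s) if ch not in bad) for s in infile]
-- ===== Notes on version B (the rewrite author's own statement) =====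
-- stated objective: idiomatic
-- what changed: Replaces the chain of seven sequential whole-string .replace passes with a single character-level pass per element that keeps only characters outside the removal set, built as a list comprehension over the input.
import Mathlib
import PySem

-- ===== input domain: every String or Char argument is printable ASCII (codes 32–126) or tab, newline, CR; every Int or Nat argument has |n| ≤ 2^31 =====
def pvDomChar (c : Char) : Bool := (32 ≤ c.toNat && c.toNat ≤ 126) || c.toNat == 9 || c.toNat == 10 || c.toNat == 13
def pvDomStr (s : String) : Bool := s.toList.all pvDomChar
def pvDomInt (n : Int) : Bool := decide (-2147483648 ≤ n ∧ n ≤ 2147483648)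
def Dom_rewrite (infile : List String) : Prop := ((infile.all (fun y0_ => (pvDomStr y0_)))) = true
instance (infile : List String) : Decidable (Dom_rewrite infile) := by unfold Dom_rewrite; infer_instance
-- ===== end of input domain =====

-- B does one character-level membership-filter pass per element instead of A's seven sequential whole-string replace passes (idiomatic; same return value).
-- ===== PORT A =====
def rewriteRowA (string : String) : String :=
  let row := PySem.Str.replace string "[" ""
  let row := PySem.Str.replace row "]" ""
  let row := PySem.Str.replace row "\"" ""
  let row := PySem.Str.replace row "\n" ""
  let row := PySem.Str.replace row " " ""
  let row := PySem.Str.replace row "'" ""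
  let row := PySem.Str.replace row "?" ""
  row

def rewrite (infile : List String) : List String :=
  (PySem.List.pyRange 0 infile.length 1).foldl
    (fun edit i => edit ++ [rewriteRowA (PySem.List.pyGetD infile i "")]) []

-- ===== PORT B =====
def badChars : List Char := ['[', ']', '"', '\n', ' ', '\'', '?']

def rewrite_alt (infile : List String) : List String :=
  infile.map (fun s => String.mk (s.toList.filter (fun c => !(badChars.contains c))))

-- ===== PRECONDITION & SPEC =====
def Spec_rewrite (infile : List String) (out : List String) : Prop := out = rewrite_alt infile
instance (infile : List String) (out : List String) : Decidable (Spec_rewrite infile out) := by unfold Spec_rewrite; infer_instance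

-- ===== CLAIM (what is proved, stated in full; the proofs are below) =====
def Claim_equal_rewrite : Prop := ∀ (infile : List String), Dom_rewrite infile → Spec_rewrite infile (rewrite infile)

-- ===== LEMMAS AND PROOFS =====
-- Chars.replace.go with a one-character pattern and empty replacement is a filter.
lemma replace_go_single (a : Char) :
    ∀ (fuel : Nat) (l acc : List Char), l.length ≤ fuel →
      PySem.Chars.replace.go [a] [] fuel l acc
        = acc.reverse ++ l.filter (fun c => !(c == a)) := by
  intro fuel
  induction fuel with
  | zero =>
    intro l acc h
    have : l = [] := List.eq_nil_of_length_eq_zero (Nat.le_zero.mp h)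
    subst this
    simp [PySem.Chars.replace.go]
  | succ n ih =>
    intro l acc h
    cases l with
    | nil => simp [PySem.Chars.replace.go]
    | cons c t =>
      simp only [PySem.Chars.replace.go, List.isPrefixOf, Bool.and_true]
      by_cases hc : c = a
      · subst hc
        simp only [beq_self_eq_true, if_pos]
        rw [show PySem.Chars.replace.go [c] [] n (List.drop [c].length (c :: t))
              ([].reverse ++ acc) = PySem.Chars.replace.go [c] [] n t acc by simp,
            ih t acc (by simpa using Nat.le_of_succ_le_succ h)]
        simp
      · have hbc : (a == c) = false := by simp [beq_eq_false_iff_ne]; exact fun e => hc e.symm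
        simp only [hbc, Bool.false_eq_true, if_neg, not_false_iff]
        rw [ih t (c :: acc) (by simpa using Nat.le_of_succ_le_succ h)]
        simp [hc]

-- String-level: replacing one character by the empty string filters it out.
lemma replace_single (s : String) (o : String) (a : Char) (ho : o.toList = [a]) :
    (PySem.Str.replace s o "").toList
      = s.toList.filter (fun c => !(c == a)) := by
  rw [PySem.Str.toList_replace, ho]
  show PySem.Chars.replace s.toList [a] [] = _
  unfold PySem.Chars.replace
  simp only [List.isEmpty_cons, if_neg, Bool.false_eq_true, not_false_iff]
  simpa using replace_go_single a s.toList.length s.toList []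

lemma rewriteRowA_eq (s : String) :
    rewriteRowA s = String.mk (s.toList.filter (fun c => !(badChars.contains c))) := by
  have h : (rewriteRowA s).toList
      = s.toList.filter (fun c => !(badChars.contains c)) := by
    show (PySem.Str.replace (PySem.Str.replace (PySem.Str.replace (PySem.Str.replace
      (PySem.Str.replace (PySem.Str.replace (PySem.Str.replace s "[" "") "]" "")
      "\"" "") "\n" "") " " "") "'" "") "?" "").toList = _
    rw [replace_single _ "?" '?' rfl, replace_single _ "'" '\'' rfl,
        replace_single _ " " ' ' rfl, replace_single _ "\n" '\n' rfl,
        replace_single _ "\"" '"' rfl, replace_single _ "]" ']' rfl,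
        replace_single _ "[" '[' rfl]
    simp only [List.filter_filter]
    apply List.filter_congr
    intro c _
    simp only [badChars, List.contains_cons, List.contains_nil]
    cases h1 : c == '[' <;> cases h2 : c == ']' <;> cases h3 : c == '"' <;>
      cases h4 : c == '\n' <;> cases h5 : c == ' ' <;> cases h6 : c == '\'' <;>
      cases h7 : c == '?' <;> simp_all
  have h2 : String.ofList (rewriteRowA s).toList
      = String.mk (s.toList.filter (fun c => !(badChars.contains c))) := by rw [h]; rfl
  rw [← h2, String.ofList_toList]

-- ===== VERDICT (by name: the statement is the Claim_ definition above) =====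
theorem rewrite_spec : Claim_equal_rewrite := by
  intro infile _
  show rewrite infile = rewrite_alt infile
  unfold rewrite rewrite_alt
  rw [PySem.List.foldl_pyRange_zero_pyGetD' infile "" (fun edit x => edit ++ [rewriteRowA x]) []]
  rw [PySem.List.foldl_append_singleton_eq_map]
  exact List.map_congr_left (fun s _ => rewriteRowA_eq s)
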